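-- pv_equiv track=rewrite | github.com/phatakshaunak/scaler_academy | DSA_Problem_Solving/Hashing_1/sort_given_order.py | solve
-- ===== SOURCE A (Python) =====
-- def solve(A, B):
--     '''
--     Frequency map of A
--     Fill A with values from B
--     Fill temp array with values remaining in A from map
--     Append temp to A and return
--     '''
--     hm = {}
--
--     m, n = len(A), len(B)
--
--     for val in A:
--         if val not in hm:
--             hm[val] = 1
--         else:
--             hm[val] += 1
--
--     # Above takes O(m) time
--
--     idx = 0
--
--     for val in B:
--
--         if val in hm:
--             while hm[val] > 0:
--                 A[idx] = val
--                 hm[val] -= 1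
--                 idx += 1
--     # Above takes O(n) time
--
--     temp = []
--
--     for v in hm:
--         for i in range(hm[v]):
--             temp.append(v)
--
--     # Above takes O(rem) time (rem being the remaining elements in A)
--
--     temp.sort()
--
--     # Above takes O(rem log rem) time
--
--     for j in range(idx, m):
--         A[j] = temp[j - idx]
--
--     # Above takes O(rem) time
--
--     return A
-- ===== SOURCE B (Python) =====
-- def solve(A, B):
--     # Rank each value by its first occurrence in B; sort A in place with a
--     # composite key: B-members first (grouped in B's first-occurrence order,
--     # stable), then the rest in ascending order.
--     rank = {}
--     for i, v in enumerate(B):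
--         if v not in rank:
--             rank[v] = i
--     A.sort(key=lambda x: (0, rank[x]) if x in rank else (1, x))
--     return A
-- ===== Notes on version B (the rewrite author's own statement) =====
-- stated objective: simpler
-- what changed: Replaces A's frequency map + bucket-fill of A from B + separately sorted leftover pass with a single stable sort of A under a composite key (first-occurrence rank in B for B-members, the value itself for the rest), which yields the same grouping and ordering in one pass.
import Mathlib
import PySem

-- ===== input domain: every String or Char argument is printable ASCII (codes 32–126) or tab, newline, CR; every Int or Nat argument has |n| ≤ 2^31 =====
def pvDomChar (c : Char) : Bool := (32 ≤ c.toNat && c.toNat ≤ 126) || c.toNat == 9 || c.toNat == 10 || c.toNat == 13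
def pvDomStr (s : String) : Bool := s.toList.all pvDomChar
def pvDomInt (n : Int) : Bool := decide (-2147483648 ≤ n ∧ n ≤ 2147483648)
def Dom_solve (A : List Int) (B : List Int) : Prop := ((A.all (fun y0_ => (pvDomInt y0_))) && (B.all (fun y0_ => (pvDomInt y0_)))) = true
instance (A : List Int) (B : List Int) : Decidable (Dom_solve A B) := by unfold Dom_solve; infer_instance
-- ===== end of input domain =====

-- B replaces A's frequency-map + bucket-fill + leftover-sort with one stable sort of A
-- under a composite key (B-rank first, value second); simpler, same observable result.
-- Both A and B mutate the argument list in place in Python; the equivalence proved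
-- here is about the returned value (which is that mutated list in both).


-- ===== PORT A =====
-- the 'while hm[val] > 0: A[idx] = val; hm[val] -= 1; idx += 1' loop; fuel is the
-- current count hm[val], which is exactly the number of iterations the while performs.
-- idx is always < len(A) when the body runs, so List.set is exact for A[idx] = val.
def solveFill (fuel : Nat) (val : Int) (st : List Int × PySem.Dict Int Int × Nat) :
    List Int × PySem.Dict Int Int × Nat :=
  match fuel with
  | 0 => st
  | f + 1 =>
    if st.2.1.getD val 0 > 0 then
      solveFill f val (st.1.set st.2.2 val, st.2.1.modify val 0 (· - 1), st.2.2 + 1)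
    else st

-- transliteration of A: frequency map of A, bucket-fill A from B, append sorted leftovers.
-- In the final loop temp[j - idx] is always in range, so pyGetD is exact for temp[j - idx].
def solve (A : List Int) (B : List Int) : List Int :=
  let hm : PySem.Dict Int Int :=
    A.foldl (fun hm val => if hm.contains val = false then hm.insert val 1 else hm.modify val 0 (· + 1))
      PySem.Dict.empty
  let m := A.length
  let st := B.foldl (fun st val =>
      if st.2.1.contains val then solveFill (st.2.1.getD val 0).toNat val st else st)
    (A, hm, 0)
  let temp := st.2.1.items.foldl
      (fun t p => (PySem.List.pyRange 0 p.2 1).foldl (fun t _ => t ++ [p.1]) t) []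
  let temp := PySem.List.sorted temp (fun x => x) false
  (PySem.List.pyRange (st.2.2 : Int) (m : Int) 1).foldl
    (fun A2 j => A2.set j.toNat (PySem.List.pyGetD temp (j - (st.2.2 : Int)) 0)) st.1

-- ===== PORT B =====
-- transliteration of B: first-occurrence rank table from B, then one stable sort of A
-- with key (0, rank[x]) if x in rank else (1, x).
def solve_alt (A : List Int) (B : List Int) : List Int :=
  let rank : PySem.Dict Int Int :=
    (PySem.List.enumerate B 0).foldl
      (fun r p => if r.contains p.2 = false then r.insert p.2 p.1 else r) PySem.Dict.empty
  PySem.List.sorted2 A (fun x => if rank.contains x then (0 : Int) else 1)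
    (fun x => rank.getD x x) false

-- ===== PRECONDITION & SPEC =====
def Spec_solve (A : List Int) (B : List Int) (out : List Int) : Prop := out = solve_alt A B
instance (A : List Int) (B : List Int) (out : List Int) : Decidable (Spec_solve A B out) := by unfold Spec_solve; infer_instance

-- ===== CLAIM (what is proved, stated in full; the proofs are below) =====
def Claim_equal_solve : Prop := ∀ (A : List Int) (B : List Int), Dom_solve A B → Spec_solve A B (solve A B)

-- ===== LEMMAS AND PROOFS =====

-- the composite sort key, expressed directly in terms of B
def pvKey (B : List Int) (x : Int) : Lex (Int × Int) :=
  toLex (if x ∈ B then (0 : Int) else 1, if x ∈ B then (B.idxOf x : Int) else x)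

-- the common canonical result: B's values (first occurrences, in order) each repeated
-- as often as it occurs in A, then A's values not in B in ascending order
def pvCanon (A : List Int) (B : List Int) : List Int :=
  ((PySem.List.dedup B).flatMap fun b => List.replicate (A.count b) b) ++
    PySem.List.sorted (A.filter fun x => !decide (x ∈ B)) (fun x => x) false

theorem pvKey_injective (B : List Int) : Function.Injective (pvKey B) := by
  intro x y h
  unfold pvKey at h
  have h2 := toLex.injective h
  by_cases hx : x ∈ B <;> by_cases hy : y ∈ B <;> simp [hx, hy] at h2
  · have hidx : B.idxOf x = B.idxOf y := by exact_mod_cast h2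
    have e1 := List.getElem_idxOf (List.idxOf_lt_length_of_mem hx)
    have e2 := List.getElem_idxOf (List.idxOf_lt_length_of_mem hy)
    rw [← e1, ← e2]
    congr 1
  · exact h2

theorem count_flatMap_replicate (l : List Int) (hl : l.Nodup) (g : Int → Nat) (v : Int) :
    (l.flatMap fun b => List.replicate (g b) b).count v = if v ∈ l then g v else 0 := by
  induction l with
  | nil => simp
  | cons b t ih =>
    rw [List.nodup_cons] at hl
    rw [List.flatMap_cons, List.count_append, List.count_replicate, ih hl.2]
    by_cases hv : v = b
    · subst hv; simp [hl.1]
    · simp [hv, Ne.symm hv]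

theorem dedup_append_singleton (l : List Int) (b : Int) :
    PySem.List.dedup (l ++ [b]) = if b ∈ l then PySem.List.dedup l else PySem.List.dedup l ++ [b] := by
  rw [PySem.List.dedup_eq_ofList, PySem.List.dedup_eq_ofList, PySem.Set.ofList_eq_foldl,
      PySem.Set.ofList_eq_foldl, List.foldl_append]
  simp only [List.foldl_cons, List.foldl_nil]
  rw [show PySem.Set.add (List.foldl PySem.Set.add [] l) b
      = if PySem.Set.contains (List.foldl PySem.Set.add [] l) b then List.foldl PySem.Set.add [] l
        else List.foldl PySem.Set.add [] l ++ [b] from rfl]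
  have : PySem.Set.contains (List.foldl PySem.Set.add [] l) b = decide (b ∈ l) := by
    rw [← PySem.Set.ofList_eq_foldl]
    simp [pysem, PySem.Set.contains]
  rw [this]
  by_cases hb : b ∈ l <;> simp [hb]

theorem pairwise_idxOf_dedup (l : List Int) :
    (PySem.List.dedup l).Pairwise (fun a b => l.idxOf a < l.idxOf b) := by
  induction l using List.reverseRecOn with
  | nil => simp [PySem.List.dedup]
  | append_singleton t b ih =>
    rw [dedup_append_singleton]
    by_cases hb : b ∈ t
    · simp only [hb, if_true]
      refine ih.imp_of_mem ?_
      intro a c ha hc h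
      have ha' : a ∈ t := by simpa using (PySem.List.mem_dedup t a).mp ha
      have hc' : c ∈ t := by simpa using (PySem.List.mem_dedup t c).mp hc
      rwa [List.idxOf_append, List.idxOf_append, if_pos ha', if_pos hc']
    · simp only [hb, if_false]
      rw [List.pairwise_append]
      refine ⟨ih.imp_of_mem ?_, by simp, ?_⟩
      · intro a c ha hc h
        have ha' : a ∈ t := by simpa using (PySem.List.mem_dedup t a).mp ha
        have hc' : c ∈ t := by simpa using (PySem.List.mem_dedup t c).mp hc
        rwa [List.idxOf_append, List.idxOf_append, if_pos ha', if_pos hc']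
      · intro a ha c hc
        simp only [List.mem_singleton] at hc
        subst hc
        have ha' : a ∈ t := by simpa using (PySem.List.mem_dedup t a).mp ha
        rw [List.idxOf_append, List.idxOf_append, if_pos ha', if_neg hb]
        have := List.idxOf_lt_length_of_mem ha'
        simp
        omega

theorem sorted2_eq_sorted_lex (xs : List Int) (k1 k2 : Int → Int) :
    PySem.List.sorted2 xs k1 k2 false
      = PySem.List.sorted xs (fun x => toLex (k1 x, k2 x)) false := by
  rw [PySem.List.sorted_eq_foldl_insertBy]
  unfold PySem.List.sorted2
  simp only [if_neg (by decide : ¬ (false = true))]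
  have hf : ∀ (a b : Int),
      (decide (k1 a < k1 b) || (!decide (k1 b < k1 a) && decide (k2 a < k2 b)))
        = decide (toLex (k1 a, k2 a) < toLex (k1 b, k2 b)) := by
    intro a b
    have hiff : (toLex (k1 a, k2 a) < toLex (k1 b, k2 b)) ↔
        (k1 a < k1 b ∨ k1 a = k1 b ∧ k2 a < k2 b) := Prod.Lex.toLex_lt_toLex
    rw [Bool.eq_iff_iff]
    simp only [decide_eq_true_eq, Bool.or_eq_true, Bool.and_eq_true, Bool.not_eq_eq_eq_not,
      Bool.not_true, decide_eq_false_iff_not, hiff]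
    omega
  simp only [hf]

theorem rank_get? (B : List Int) : ∀ (s : Int) (r : PySem.Dict Int Int) (x : Int),
    ((PySem.List.enumerate B s).foldl
      (fun r p => if r.contains p.2 = false then r.insert p.2 p.1 else r) r).get? x
    = if r.contains x then r.get? x
      else if x ∈ B then some (s + (B.idxOf x : Int)) else none := by
  induction B with
  | nil =>
    intro s r x
    by_cases h : r.contains x
    · simp [PySem.List.enumerate_nil, h]
    · simp only [PySem.List.enumerate_nil, List.foldl_nil]
      rw [if_neg h, if_neg (by simp), PySem.Dict.get?_eq_none_iff_contains]
      simp at h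
      exact h
  | cons b t ih =>
    intro s r x
    rw [PySem.List.enumerate_cons, List.foldl_cons]
    rw [show (if r.contains (s, b).2 = false then r.insert (s, b).2 (s, b).1 else r)
        = (if r.contains b = false then r.insert b s else r) from rfl]
    by_cases hc : r.contains b
    · rw [if_neg (by simp [hc]), ih]
      by_cases hx : r.contains x
      · simp [hx]
      · have hxb : x ≠ b := fun h => hx (h ▸ hc)
        rw [Bool.not_eq_true] at hx
        simp only [hx, Bool.false_eq_true, if_false, List.mem_cons]
        by_cases hxt : x ∈ t
        · rw [if_pos hxt, if_pos (Or.inr hxt), List.idxOf_cons_ne _ (fun h => hxb h.symm)]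
          congr 1
          push_cast; ring
        · rw [if_neg hxt, if_neg (by simp [hxb, hxt])]
    · rw [if_pos (by simp [hc]), ih]
      by_cases hx : x = b
      · subst hx
        rw [if_pos (PySem.Dict.contains_insert_self r x s),
          PySem.Dict.get?_insert_self, if_neg hc,
          if_pos (List.mem_cons_self), List.idxOf_cons_self]
        simp
      · have hci : (r.insert b s).contains x = r.contains x := by
          rw [PySem.Dict.contains_insert]
          simp [hx]
        rw [hci]
        by_cases hrx : r.contains x
        · simp [hrx, PySem.Dict.get?_insert_of_ne r s hx]
        · rw [Bool.not_eq_true] at hrx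
          simp only [hrx, Bool.false_eq_true, if_false, List.mem_cons]
          by_cases hxt : x ∈ t
          · rw [if_pos hxt, if_pos (Or.inr hxt), List.idxOf_cons_ne _ (fun h => hx h.symm)]
            congr 1
            push_cast; ring
          · rw [if_neg hxt, if_neg (by simp [hx, hxt])]

theorem pairwise_flatMap_replicate (R : Int → Int → Prop) (g : Int → Nat) :
    ∀ (l : List Int), l.Pairwise R → (∀ x ∈ l, R x x) →
    (l.flatMap fun b => List.replicate (g b) b).Pairwise R := by
  intro l
  induction l with
  | nil => simp
  | cons b t ih =>
    intro hp hr
    rw [List.pairwise_cons] at hp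
    rw [List.flatMap_cons, List.pairwise_append]
    refine ⟨List.pairwise_replicate.mpr (Or.inr (hr b List.mem_cons_self)), ih hp.2 ?_, ?_⟩
    · exact fun x hx => hr x (List.mem_cons_of_mem _ hx)
    · intro a ha c hc
      rw [List.eq_of_mem_replicate ha]
      obtain ⟨d, hd, hcd⟩ := List.mem_flatMap.mp hc
      rw [List.eq_of_mem_replicate hcd]
      exact hp.1 d hd

theorem pvCanon_perm (A B : List Int) : (pvCanon A B).Perm A := by
  rw [List.perm_iff_count]
  intro v
  unfold pvCanon
  rw [List.count_append, count_flatMap_replicate _ (PySem.List.nodup_dedup B),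
    ((PySem.List.sorted_perm _ _ _)).count_eq]
  by_cases hv : v ∈ B
  · have hz : List.count v (List.filter (fun x => !decide (x ∈ B)) A) = 0 := by
      rw [List.count_eq_zero]
      intro hmem
      have := (List.mem_filter.mp hmem).2
      simp [hv] at this
    rw [if_pos ((PySem.List.mem_dedup B v).mpr hv), hz, add_zero]
  · rw [if_neg (fun h => hv ((PySem.List.mem_dedup B v).mp h)),
      List.count_filter (by simp [hv]), zero_add]

theorem pvCanon_pairwise (A B : List Int) :
    (pvCanon A B).Pairwise (fun a b => pvKey B a ≤ pvKey B b) := by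
  unfold pvCanon
  rw [List.pairwise_append]
  refine ⟨?_, ?_, ?_⟩
  · refine pairwise_flatMap_replicate _ _ _ ((pairwise_idxOf_dedup B).imp_of_mem ?_) (fun _ _ => le_refl _)
    intro a b ha hb h
    have ha' : a ∈ B := (PySem.List.mem_dedup B a).mp ha
    have hb' : b ∈ B := (PySem.List.mem_dedup B b).mp hb
    unfold pvKey
    rw [Prod.Lex.toLex_le_toLex]
    simp only [ha', hb', if_true]
    refine Or.inr ⟨by trivial, ?_⟩
    exact_mod_cast Nat.le_of_lt h
  · refine (PySem.List.sorted_pairwise _ _).imp_of_mem ?_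
    intro a b ha hb h
    have ha' : a ∉ B := by
      have := List.of_mem_filter ((PySem.List.mem_sorted _ _ _ _).mp ha)
      simpa using this
    have hb' : b ∉ B := by
      have := List.of_mem_filter ((PySem.List.mem_sorted _ _ _ _).mp hb)
      simpa using this
    unfold pvKey
    rw [Prod.Lex.toLex_le_toLex]
    simp only [ha', hb', if_false]
    exact Or.inr ⟨by trivial, h⟩
  · intro a ha c hc
    obtain ⟨d, hd, had⟩ := List.mem_flatMap.mp ha
    have ha' : a ∈ B := by
      rw [List.eq_of_mem_replicate had]
      exact (PySem.List.mem_dedup B d).mp hd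
    have hc' : c ∉ B := by
      have := List.of_mem_filter ((PySem.List.mem_sorted _ _ _ _).mp hc)
      simpa using this
    unfold pvKey
    rw [Prod.Lex.toLex_le_toLex]
    simp only [ha', hc', if_true, if_false]
    exact Or.inl (by norm_num)

theorem alt_eq_canon (A B : List Int) : solve_alt A B = pvCanon A B := by
  have hkey : (fun x => toLex
      ((if ((PySem.List.enumerate B 0).foldl
          (fun r p => if r.contains p.2 = false then r.insert p.2 p.1 else r)
          PySem.Dict.empty).contains x then (0 : Int) else 1),
       ((PySem.List.enumerate B 0).foldl
          (fun r p => if r.contains p.2 = false then r.insert p.2 p.1 else r)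
          PySem.Dict.empty).getD x x)) = pvKey B := by
    funext x
    have hg := rank_get? B 0 PySem.Dict.empty x
    rw [if_neg (by simp [PySem.Dict.contains_empty])] at hg
    unfold pvKey
    by_cases hx : x ∈ B
    · rw [if_pos hx] at hg
      have hcont : ((PySem.List.enumerate B 0).foldl
          (fun r p => if r.contains p.2 = false then r.insert p.2 p.1 else r)
          PySem.Dict.empty).contains x = true := by
        rw [PySem.Dict.contains_eq_isSome_get?, hg]; rfl
      rw [hcont, if_pos rfl, PySem.Dict.getD_eq_get?_getD, hg]
      simp [hx]
    · rw [if_neg hx] at hg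
      have hcont : ((PySem.List.enumerate B 0).foldl
          (fun r p => if r.contains p.2 = false then r.insert p.2 p.1 else r)
          PySem.Dict.empty).contains x = false := by
        rw [PySem.Dict.contains_eq_isSome_get?, hg]; rfl
      rw [hcont, if_neg (by simp), PySem.Dict.getD_eq_get?_getD, hg]
      simp [hx]
  show PySem.List.sorted2 A _ _ false = _
  rw [sorted2_eq_sorted_lex, hkey]
  exact PySem.List.eq_of_perm_of_pairwise_le_of_injective (pvKey B) (pvKey_injective B)
    ((PySem.List.sorted_perm _ _ _).trans (pvCanon_perm A B).symm)
    (PySem.List.sorted_pairwise _ _) (pvCanon_pairwise A B)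

theorem set_take_succ (l : List Int) (a : Int) (i : Nat) (h : i < l.length) :
    (l.set i a).take (i+1) = l.take i ++ [a] := by
  rw [List.set_eq_take_append_cons_drop, if_pos h, List.take_append]
  have hlen : (List.take i l).length = i := List.length_take_of_le (Nat.le_of_lt h)
  rw [hlen]
  simp

theorem hm_eq_counter (A : List Int) :
    A.foldl (fun hm val => if hm.contains val = false then hm.insert val 1 else hm.modify val 0 (· + 1))
      PySem.Dict.empty = PySem.Dict.counter A := by
  rw [PySem.Dict.counter_eq_foldl]
  apply PySem.List.foldl_congr_mem
  intro d v _
  by_cases h : d.contains v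
  · simp [h]
  · rw [if_pos (by simp [h])]
    show d.insert v 1 = d.insert v (d.getD v 0 + 1)
    rw [PySem.Dict.getD_of_not_contains d 0 (by simp [h])]
    norm_num

theorem fill_spec (val : Int) : ∀ (c : Nat) (xs : List Int) (hm : PySem.Dict Int Int) (idx : Nat),
    hm.getD val 0 = (c : Int) → idx + c ≤ xs.length →
    (solveFill c val (xs, hm, idx)).1 = xs.take idx ++ List.replicate c val ++ xs.drop (idx + c)
    ∧ (solveFill c val (xs, hm, idx)).2.2 = idx + c
    ∧ (solveFill c val (xs, hm, idx)).2.1.keys = hm.keys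
    ∧ (∀ w, (solveFill c val (xs, hm, idx)).2.1.getD w 0 = if w = val then 0 else hm.getD w 0) := by
  intro c
  induction c with
  | zero =>
    intro xs hm idx hget _
    refine ⟨by simp [solveFill], by simp [solveFill], by simp [solveFill], ?_⟩
    intro w
    by_cases hw : w = val
    · subst hw; simpa [solveFill] using hget
    · simp [solveFill, hw]
  | succ c ih =>
    intro xs hm idx hget hlen
    have hidx : idx < xs.length := by omega
    have hstep : solveFill (c+1) val (xs, hm, idx)
        = solveFill c val (xs.set idx val, hm.modify val 0 (· - 1), idx + 1) := by
      show (if hm.getD val 0 > 0 then _ else _) = _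
      rw [if_pos (by rw [hget]; positivity)]
    have hcont : hm.contains val = true := by
      by_contra h
      rw [PySem.Dict.getD_of_not_contains hm 0 (by simpa using h)] at hget
      omega
    have hget' : (hm.modify val 0 (· - 1)).getD val 0 = (c : Int) := by
      rw [PySem.Dict.getD_modify_self, hget]; push_cast; ring
    have hlen' : (idx + 1) + c ≤ (xs.set idx val).length := by
      rw [List.length_set]; omega
    obtain ⟨h1, h2, h3, h4⟩ := ih (xs.set idx val) (hm.modify val 0 (· - 1)) (idx + 1) hget' hlen'
    rw [hstep]
    refine ⟨?_, by rw [h2]; omega, ?_, ?_⟩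
    · rw [h1, set_take_succ _ _ _ hidx, List.drop_set_of_lt (by omega : idx < idx + 1 + c)]
      rw [show idx + 1 + c = idx + (c+1) from by omega]
      simp [List.replicate_succ]
    · rw [h3, PySem.Dict.keys_modify, PySem.Dict.keys_insert_of_contains _ _ hcont]
    · intro w
      rw [h4 w]
      by_cases hw : w = val
      · simp [hw]
      · rw [if_neg hw, if_neg hw, PySem.Dict.getD_modify_of_ne _ _ _ hw]

theorem write_spec : ∀ (t xs : List Int) (idx : Nat), idx + t.length = xs.length →
    (PySem.List.pyRange (idx : Int) (xs.length : Int) 1).foldl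
      (fun ys j => ys.set j.toNat (PySem.List.pyGetD t (j - (idx : Int)) 0)) xs
    = xs.take idx ++ t := by
  intro t
  induction t with
  | nil =>
    intro xs idx h
    simp only [List.length_nil, Nat.add_zero] at h
    rw [PySem.List.pyRange_one_eq_nil (by exact_mod_cast Nat.le_of_eq h.symm)]
    subst h
    simp
  | cons a t ih =>
    intro xs idx h
    simp only [List.length_cons] at h
    have hidx : idx < xs.length := by omega
    rw [PySem.List.pyRange_one_cons (by exact_mod_cast hidx), List.foldl_cons]
    have hfirst : (xs.set ((idx : Int)).toNat (PySem.List.pyGetD (a :: t) ((idx : Int) - (idx : Int)) 0))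
        = xs.set idx a := by
      rw [show (idx : Int) - (idx : Int) = 0 from by ring,
        PySem.List.pyGetD_eq_getElem _ _ (le_refl 0) (by simp)]
      simp
    rw [hfirst]
    have hxl : ((xs.length : Nat) : Int) = (idx : Int) + 1 + t.length := by omega
    have hcong : (PySem.List.pyRange ((idx : Int) + 1) (xs.length : Int) 1).foldl
        (fun ys j => ys.set j.toNat (PySem.List.pyGetD (a :: t) (j - (idx : Int)) 0)) (xs.set idx a)
        = (PySem.List.pyRange ((idx : Int) + 1) (xs.length : Int) 1).foldl
        (fun ys j => ys.set j.toNat (PySem.List.pyGetD t (j - ((idx + 1 : Nat) : Int)) 0)) (xs.set idx a) := by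
      apply PySem.List.foldl_congr_mem
      intro acc j hj
      have hj' := (PySem.List.mem_pyRange_one).mp hj
      have h0a : 0 ≤ j - (idx : Int) := by omega
      have h1a : j - (idx : Int) < (((a :: t).length : Nat) : Int) := by
        simp only [List.length_cons]
        push_cast
        omega
      have h0b : 0 ≤ j - ((idx + 1 : Nat) : Int) := by omega
      have h1b : j - ((idx + 1 : Nat) : Int) < ((t.length : Nat) : Int) := by push_cast; omega
      rw [PySem.List.pyGetD_eq_getElem _ _ h0a h1a, PySem.List.pyGetD_eq_getElem _ _ h0b h1b]
      have heq : (j - (idx : Int)).toNat = (j - ((idx + 1 : Nat) : Int)).toNat + 1 := by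
        push_cast
        omega
      simp [heq]
    rw [hcong]
    have hlen : ((idx + 1 : Nat) : Int) = (idx : Int) + 1 := by push_cast; ring
    rw [← hlen, show ((xs.length : Int)) = (((xs.set idx a).length : Nat) : Int) from by simp]
    rw [ih (xs.set idx a) (idx + 1) (by simp; omega)]
    rw [set_take_succ _ _ _ hidx]
    simp

def pvP (A l : List Int) : List Int :=
  (PySem.List.dedup l).flatMap fun b => List.replicate (A.count b) b

theorem pvP_perm (A l : List Int) : (pvP A l).Perm (A.filter fun x => decide (x ∈ l)) := by
  rw [List.perm_iff_count]
  intro v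
  unfold pvP
  rw [count_flatMap_replicate _ (PySem.List.nodup_dedup l)]
  by_cases hv : v ∈ l
  · rw [if_pos ((PySem.List.mem_dedup l v).mpr hv), List.count_filter (by simp [hv])]
  · rw [if_neg (fun h => hv ((PySem.List.mem_dedup l v).mp h)), Eq.comm, List.count_eq_zero]
    intro hmem
    have := (List.mem_filter.mp hmem).2
    simp [hv] at this

theorem pvP_len_le (A l : List Int) : (pvP A l).length ≤ A.length := by
  rw [(pvP_perm A l).length_eq]
  exact List.length_filter_le _ _

def pvLoop (A l : List Int) : List Int × PySem.Dict Int Int × Nat :=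
  l.foldl (fun st val => if st.2.1.contains val then solveFill (st.2.1.getD val 0).toNat val st else st)
    (A, PySem.Dict.counter A, 0)

theorem loop_inv (A : List Int) : ∀ (l : List Int),
    (pvLoop A l).1 = pvP A l ++ A.drop (pvP A l).length
    ∧ (pvLoop A l).2.2 = (pvP A l).length
    ∧ (pvLoop A l).2.1.keys = (PySem.Dict.counter A).keys
    ∧ ∀ v, (pvLoop A l).2.1.getD v 0 = if v ∈ l then 0 else A.count v := by
  intro l
  induction l using List.reverseRecOn with
  | nil =>
    refine ⟨by simp [pvLoop, pvP, PySem.List.dedup, PySem.Set.ofList], ?_, rfl, ?_⟩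
    · simp [pvLoop, pvP, PySem.List.dedup, PySem.Set.ofList]
    · intro v
      simp [pvLoop, PySem.Dict.getD_counter]
  | append_singleton t b ih =>
    obtain ⟨ih1, ih2, ih3, ih4⟩ := ih
    have hstep : pvLoop A (t ++ [b])
        = (if (pvLoop A t).2.1.contains b
            then solveFill ((pvLoop A t).2.1.getD b 0).toNat b (pvLoop A t)
            else pvLoop A t) := by
      unfold pvLoop
      rw [List.foldl_append]
      rfl
    have hcont : (pvLoop A t).2.1.contains b = decide (b ∈ A) := by
      rw [PySem.Dict.contains_eq_decide_mem_keys, ih3, PySem.Dict.keys_counter]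
      simp [PySem.Set.mem_ofList]
    by_cases hbA : b ∈ A
    · by_cases hbt : b ∈ t
      · -- already processed: count is 0, the while-loop does nothing
        have hP : pvP A (t ++ [b]) = pvP A t := by
          unfold pvP
          rw [dedup_append_singleton, if_pos hbt]
        have hfuel : ((pvLoop A t).2.1.getD b 0).toNat = 0 := by
          rw [ih4 b, if_pos hbt]
          rfl
        have hsame : pvLoop A (t ++ [b]) = pvLoop A t := by
          rw [hstep, if_pos (by rw [hcont]; simp [hbA]), hfuel]
          rfl
        rw [hsame, hP]
        refine ⟨ih1, ih2, ih3, ?_⟩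
        intro v
        rw [ih4 v]
        by_cases hv : v ∈ t
        · rw [if_pos hv, if_pos (by simp [hv])]
        · rw [if_neg hv, if_neg (by simp [hv]; intro he; exact absurd (he ▸ hbt) hv)]
      · -- fresh value of B present in A: the while-loop writes A.count b copies
        have hP : pvP A (t ++ [b]) = pvP A t ++ List.replicate (A.count b) b := by
          unfold pvP
          rw [dedup_append_singleton, if_neg hbt, List.flatMap_append]
          simp
        have hgd : (pvLoop A t).2.1.getD b 0 = (A.count b : Int) := by
          rw [ih4 b, if_neg hbt]
        have hlenP : (pvP A t).length + A.count b ≤ A.length := by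
          have h1 := pvP_len_le A (t ++ [b])
          rw [hP, List.length_append, List.length_replicate] at h1
          exact h1
        have hst1len : (pvLoop A t).1.length = A.length := by
          rw [ih1, List.length_append, List.length_drop]
          have := pvP_len_le A t
          omega
        obtain ⟨h1, h2, h3, h4⟩ := fill_spec b (A.count b) (pvLoop A t).1 (pvLoop A t).2.1
          (pvLoop A t).2.2 hgd (by rw [ih2, hst1len]; omega)
        have heq : pvLoop A (t ++ [b])
            = solveFill (A.count b) b ((pvLoop A t).1, (pvLoop A t).2.1, (pvLoop A t).2.2) := by
          rw [hstep, if_pos (by rw [hcont]; simp [hbA]), hgd]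
          rw [Int.toNat_natCast]
        refine ⟨?_, ?_, ?_, ?_⟩
        · rw [heq, h1, ih1, ih2, hP]
          rw [List.take_left, show (pvP A t).length + A.count b
              = (pvP A t).length + (A.count b) from rfl, List.drop_length_add_append,
            List.drop_drop, List.length_append, List.length_replicate]
        · rw [heq, h2, ih2, hP, List.length_append, List.length_replicate]
        · rw [heq, h3, ih3]
        · intro v
          rw [heq, h4 v]
          by_cases hv : v = b
          · subst hv
            simp
          · rw [if_neg hv, ih4 v]
            by_cases hvt : v ∈ t <;> simp [hvt, hv]
    · -- b not in A: hm does not contain it, nothing happens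
      have hsame : pvLoop A (t ++ [b]) = pvLoop A t := by
        rw [hstep, if_neg (by rw [hcont]; simp [hbA])]
      have hcount : A.count b = 0 := List.count_eq_zero.mpr hbA
      have hP : pvP A (t ++ [b]) = pvP A t := by
        unfold pvP
        rw [dedup_append_singleton]
        by_cases hbt : b ∈ t
        · rw [if_pos hbt]
        · rw [if_neg hbt, List.flatMap_append]
          simp [hcount]
      rw [hsame, hP]
      refine ⟨ih1, ih2, ih3, ?_⟩
      intro v
      rw [ih4 v]
      by_cases hv : v ∈ t
      · rw [if_pos hv, if_pos (by simp [hv])]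
      · rw [if_neg hv]
        by_cases hvb : v = b
        · subst hvb
          rw [if_pos (by simp), hcount]
        · rw [if_neg (by simp [hv, hvb])]

theorem final_assembly (A B : List Int) (st : List Int × PySem.Dict Int Int × Nat)
    (h1 : st.1 = pvP A B ++ A.drop (pvP A B).length)
    (h2 : st.2.2 = (pvP A B).length)
    (h3 : st.2.1.keys = (PySem.Dict.counter A).keys)
    (h4 : ∀ v, st.2.1.getD v 0 = ((if v ∈ B then 0 else A.count v : Nat) : Int)) :
    (PySem.List.pyRange (st.2.2 : Int) (A.length : Int) 1).foldl
      (fun A2 j => A2.set j.toNat (PySem.List.pyGetD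
        (PySem.List.sorted (st.2.1.items.foldl
          (fun t p => (PySem.List.pyRange 0 p.2 1).foldl (fun t _ => t ++ [p.1]) t) [])
          (fun x => x) false) (j - (st.2.2 : Int)) 0)) st.1
    = pvCanon A B := by
  have hnodup : st.2.1.keys.Nodup := h3 ▸ PySem.Dict.nodup_keys_counter A
  have hinner : ∀ (tacc : List Int) (p : Int × Int),
      (PySem.List.pyRange 0 p.2 1).foldl (fun t _ => t ++ [p.1]) tacc
        = tacc ++ List.replicate p.2.toNat p.1 := by
    intro tacc p
    rw [show (fun (t : List Int) (_ : Int) => t ++ [p.1])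
        = (fun (t : List Int) (x : Int) => t ++ [(fun _ => p.1) x]) from rfl,
      PySem.List.foldl_append_singleton_eq_map]
    congr 1
    rw [show (fun (_ : Int) => p.1) = Function.const Int p.1 from rfl, List.map_const,
      PySem.List.length_pyRange_one]
    norm_num
  have htemp0 : st.2.1.items.foldl
      (fun t p => (PySem.List.pyRange 0 p.2 1).foldl (fun t _ => t ++ [p.1]) t) []
      = (PySem.List.dedup A).flatMap (fun k => List.replicate (if k ∈ B then 0 else A.count k) k) := by
    rw [PySem.List.foldl_congr_mem _ _
        (fun (t : List Int) (p : Int × Int) => t ++ List.replicate p.2.toNat p.1) []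
        (fun acc p _ => hinner acc p),
      PySem.List.foldl_append_eq_flatMap (fun (p : Int × Int) => List.replicate p.2.toNat p.1),
      List.nil_append, PySem.Dict.items_eq_map_keys st.2.1 hnodup 0, List.flatMap_map, h3,
      PySem.Dict.keys_counter, show PySem.Set.ofList A = PySem.List.dedup A from
        (PySem.List.dedup_eq_ofList A).symm]
    congr 1
    funext k
    rw [h4 k]
    by_cases hk : k ∈ B <;> simp [hk]
  have hperm : ((PySem.List.dedup A).flatMap
      (fun k => List.replicate (if k ∈ B then 0 else A.count k) k)).Perm
      (A.filter fun x => !decide (x ∈ B)) := by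
    rw [List.perm_iff_count]
    intro v
    rw [count_flatMap_replicate _ (PySem.List.nodup_dedup A)]
    by_cases hvB : v ∈ B
    · have hz : List.count v (A.filter fun x => !decide (x ∈ B)) = 0 := by
        rw [List.count_eq_zero]
        intro hm
        have := (List.mem_filter.mp hm).2
        simp [hvB] at this
      rw [hz]
      by_cases hvA : v ∈ A <;> simp [hvA, hvB]
    · rw [List.count_filter (by simp [hvB])]
      by_cases hvA : v ∈ A
      · simp [hvA, hvB]
      · rw [if_neg (fun h => hvA ((PySem.List.mem_dedup A v).mp h)), Eq.comm, List.count_eq_zero]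
        exact hvA
  have hsorted : PySem.List.sorted (st.2.1.items.foldl
      (fun t p => (PySem.List.pyRange 0 p.2 1).foldl (fun t _ => t ++ [p.1]) t) [])
      (fun x => x) false
      = PySem.List.sorted (A.filter fun x => !decide (x ∈ B)) (fun x => x) false := by
    rw [htemp0]
    exact PySem.List.sorted_eq_sorted_of_perm _ _ _ (fun a b h => h) hperm
  rw [hsorted]
  have hplen : (pvP A B).length = (A.filter fun x => decide (x ∈ B)).length :=
    (pvP_perm A B).length_eq
  have hflen : (A.filter fun x => decide (x ∈ B)).length
      + (A.filter fun x => !decide (x ∈ B)).length = A.length :=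
    (List.length_eq_length_filter_add (fun x => decide (x ∈ B))).symm
  have hstlen : st.1.length = A.length := by
    rw [h1, List.length_append, List.length_drop]
    have := pvP_len_le A B
    omega
  rw [show ((A.length : Nat) : Int) = ((st.1.length : Nat) : Int) from by rw [hstlen]]
  rw [write_spec _ _ _ (by
    rw [PySem.List.length_sorted, h2, hstlen, hplen]
    exact hflen)]
  rw [h1, h2, List.take_left]
  unfold pvCanon pvP
  rfl

theorem solve_eq_canon (A B : List Int) : solve A B = pvCanon A B := by
  simp only [solve]
  rw [hm_eq_counter]
  obtain ⟨ih1, ih2, ih3, ih4⟩ := loop_inv A B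
  unfold pvLoop at ih1 ih2 ih3 ih4
  exact final_assembly A B _ ih1 ih2 ih3 ih4
-- ===== VERDICT (by name: the statement is the Claim_ definition above) =====
theorem solve_spec : Claim_equal_solve := by
  intro A B _
  unfold Spec_solve
  rw [solve_eq_canon, alt_eq_canon]
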